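-- pv_equiv track=rewrite | github.com/uncledata/adventofcode | 2024/day14.py | check_for_christmas_tree
-- ===== SOURCE A (Python) =====
-- def check_for_christmas_tree(grid, max_x, max_y):
--     tree_pattern = [
--         "...#...",
--         "..###..",
--         ".#####.",
--         "#######"
--     ]
--     pattern_height = len(tree_pattern)
--     pattern_width = len(tree_pattern[0])
--
--     for y in range(max_y - pattern_height + 1):
--         for x in range(max_x - pattern_width + 1):
--             match = True
--             for dy in range(pattern_height):
--                 for dx in range(pattern_width):
--                     if tree_pattern[dy][dx] == '#' and grid[y + dy][x + dx] != '#':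
--                         match = False
--                         break
--                 if not match:
--                     break
--             if match:
--                 return True
--     return False
-- ===== SOURCE B (Python) =====
-- def check_for_christmas_tree(grid, max_x, max_y):
--     # offsets of every '#' pattern cell relative to the apex (pattern row 0, column 3)
--     offsets = [(0, 0),
--                (1, -1), (1, 0), (1, 1),
--                (2, -2), (2, -1), (2, 0), (2, 1), (2, 2),
--                (3, -3), (3, -2), (3, -1), (3, 0), (3, 1), (3, 2), (3, 3)]
--     points = {(y, x)
--               for y, row in enumerate(grid)
--               for x, ch in enumerate(row) if ch == '#'}
--     return any(0 <= y <= max_y - 4 and 3 <= x <= max_x - 4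
--                and all((y + dy, x + dx) in points for dy, dx in offsets)
--                for y, x in points)
-- ===== Notes on version B (the rewrite author's own statement) =====
-- stated objective: faster
-- what changed: Instead of sliding a 4x7 window over every (y,x) of the scan area and re-reading grid cells, B collects all '#' coordinates into a hash set once and tests only the '#' cells as candidate apexes, checking the 16 fixed offsets by set membership.
-- outside the precondition, e.g. on check_for_christmas_tree(['....', '', '', ''], 7, 4): A returns False, B returns False
import Mathlib
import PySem

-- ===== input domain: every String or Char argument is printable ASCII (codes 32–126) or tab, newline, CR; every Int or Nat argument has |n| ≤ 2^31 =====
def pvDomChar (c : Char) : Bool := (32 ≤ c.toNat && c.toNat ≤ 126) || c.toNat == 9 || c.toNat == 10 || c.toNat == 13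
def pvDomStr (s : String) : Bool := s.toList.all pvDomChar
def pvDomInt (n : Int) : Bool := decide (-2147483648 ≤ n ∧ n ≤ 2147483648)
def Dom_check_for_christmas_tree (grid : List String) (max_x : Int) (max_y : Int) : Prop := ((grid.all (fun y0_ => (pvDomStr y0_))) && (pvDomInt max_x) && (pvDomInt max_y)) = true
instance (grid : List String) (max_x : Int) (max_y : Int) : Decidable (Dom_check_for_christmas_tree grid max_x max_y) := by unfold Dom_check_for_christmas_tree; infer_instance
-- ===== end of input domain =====

-- B replaces A's window scan (every (y,x) position re-reads up to 28 cells) by one pass collecting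
-- all '#' coordinates into a set and testing only '#' cells as apexes via 16 set-membership probes.

-- ===== PORT A =====
def pvA_treePattern : List String := ["...#...", "..###..", ".#####.", "#######"]

-- grid[i][j] as A reads it; the getD defaults are never reached on inputs admitted by Pre_
def pvA_cell (g : List String) (i j : Int) : Char :=
  (PySem.Str.pyGet? ((PySem.List.pyGet? g i).getD "") j).getD ' '

-- the body of A's innermost 'if'
def pvA_mismatch (grid : List String) (y x dy dx : Int) : Bool :=
  (pvA_cell pvA_treePattern dy dx == '#') && !(pvA_cell grid (y + dy) (x + dx) == '#')

-- 'for dx in range(pattern_width)' with its break (match := False)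
def pvA_row (grid : List String) (y x dy : Int) : List Int → Bool
  | [] => true
  | dx :: rest => if pvA_mismatch grid y x dy dx then false else pvA_row grid y x dy rest

-- 'for dy in range(pattern_height)' with its 'if not match: break'
def pvA_pat (grid : List String) (y x pw : Int) : List Int → Bool
  | [] => true
  | dy :: rest =>
      if pvA_row grid y x dy (PySem.List.pyRange 0 pw 1) then pvA_pat grid y x pw rest else false

-- 'for x in range(max_x - pattern_width + 1)' with its 'if match: return True'
def pvA_xloop (grid : List String) (y ph pw : Int) : List Int → Bool
  | [] => false
  | x :: rest =>
      if pvA_pat grid y x pw (PySem.List.pyRange 0 ph 1) then true else pvA_xloop grid y ph pw rest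

-- 'for y in range(max_y - pattern_height + 1)'
def pvA_yloop (grid : List String) (max_x ph pw : Int) : List Int → Bool
  | [] => false
  | y :: rest =>
      if pvA_xloop grid y ph pw (PySem.List.pyRange 0 (max_x - pw + 1) 1) then true
      else pvA_yloop grid max_x ph pw rest

def check_for_christmas_tree (grid : List String) (max_x : Int) (max_y : Int) : Bool :=
  let pattern_height : Int := (pvA_treePattern.length : Int)
  let pattern_width : Int := PySem.Str.len ((PySem.List.pyGet? pvA_treePattern 0).getD "")
  pvA_yloop grid max_x pattern_height pattern_width
    (PySem.List.pyRange 0 (max_y - pattern_height + 1) 1)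

-- ===== PORT B =====
def pvB_offsets : List (Int × Int) :=
  [(0, 0),
   (1, -1), (1, 0), (1, 1),
   (2, -2), (2, -1), (2, 0), (2, 1), (2, 2),
   (3, -3), (3, -2), (3, -1), (3, 0), (3, 1), (3, 2), (3, 3)]

-- the elements generated by B's set comprehension, in generation order
def pvB_list (grid : List String) : List (Int × Int) :=
  (PySem.List.enumerate grid).flatMap (fun yr =>
    (PySem.List.enumerate yr.2.toList).filterMap (fun xc =>
      if xc.2 = '#' then some (yr.1, xc.1) else none))

def check_for_christmas_tree_alt (grid : List String) (max_x : Int) (max_y : Int) : Bool :=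
  let points : PySem.Set (Int × Int) := PySem.Set.ofList (pvB_list grid)
  points.any (fun p =>
    decide (0 ≤ p.1 ∧ p.1 ≤ max_y - 4 ∧ 3 ≤ p.2 ∧ p.2 ≤ max_x - 4) &&
    pvB_offsets.all (fun o => PySem.Set.contains points (p.1 + o.1, p.2 + o.2)))

-- ===== PRECONDITION & SPEC =====
-- Pre_ excludes inputs on which A's window scan reads grid[i][j] out of range (IndexError).
-- It is slightly conservative: A may accidentally return False despite a short row when an
-- early pattern mismatch breaks out before the out-of-range read is reached; those inputs
-- are excluded too (see the cite in claim.json).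
def Pre_check_for_christmas_tree (grid : List String) (max_x : Int) (max_y : Int) : Prop :=
  (4 ≤ max_y ∧ 7 ≤ max_x) →
    (max_y ≤ (grid.length : Int) ∧ ∀ s ∈ grid.take max_y.toNat, max_x ≤ PySem.Str.len s)
instance (grid : List String) (max_x : Int) (max_y : Int) : Decidable (Pre_check_for_christmas_tree grid max_x max_y) := by unfold Pre_check_for_christmas_tree; infer_instance

def pvWitness_check_for_christmas_tree : List String × Int × Int :=
  (["...#...", "..###..", ".#####.", "#######"], 7, 4)

def Spec_check_for_christmas_tree (grid : List String) (max_x : Int) (max_y : Int) (out : Bool) : Prop := out = check_for_christmas_tree_alt grid max_x max_y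
instance (grid : List String) (max_x : Int) (max_y : Int) (out : Bool) : Decidable (Spec_check_for_christmas_tree grid max_x max_y out) := by unfold Spec_check_for_christmas_tree; infer_instance

-- ===== CLAIM (what is proved, stated in full; the proofs are below) =====
def Claim_equal_check_for_christmas_tree : Prop := ∀ (grid : List String) (max_x : Int) (max_y : Int), Dom_check_for_christmas_tree grid max_x max_y → Pre_check_for_christmas_tree grid max_x max_y → Spec_check_for_christmas_tree grid max_x max_y (check_for_christmas_tree grid max_x max_y)

-- ===== LEMMAS AND PROOFS =====

-- the 16 '#' cells of the pattern, in A's (dy, dx) coordinates, row-major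
def pvCells : List (Int × Int) :=
  [(0, 3),
   (1, 2), (1, 3), (1, 4),
   (2, 1), (2, 2), (2, 3), (2, 4), (2, 5),
   (3, 0), (3, 1), (3, 2), (3, 3), (3, 4), (3, 5), (3, 6)]

lemma pvA_row_eq_all (grid : List String) (y x dy : Int) (l : List Int) :
    pvA_row grid y x dy l = l.all (fun dx => !pvA_mismatch grid y x dy dx) := by
  induction l with
  | nil => rfl
  | cons a t ih =>
      by_cases h : pvA_mismatch grid y x dy a = true <;> simp [pvA_row, h, ih]

lemma pvA_pat_eq_all (grid : List String) (y x pw : Int) (l : List Int) :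
    pvA_pat grid y x pw l = l.all (fun dy => pvA_row grid y x dy (PySem.List.pyRange 0 pw 1)) := by
  induction l with
  | nil => rfl
  | cons a t ih =>
      by_cases h : pvA_row grid y x a (PySem.List.pyRange 0 pw 1) = true <;> simp [pvA_pat, h, ih]

lemma pvA_xloop_eq_any (grid : List String) (y ph pw : Int) (l : List Int) :
    pvA_xloop grid y ph pw l = l.any (fun x => pvA_pat grid y x pw (PySem.List.pyRange 0 ph 1)) := by
  induction l with
  | nil => rfl
  | cons a t ih =>
      by_cases h : pvA_pat grid y a pw (PySem.List.pyRange 0 ph 1) = true <;> simp [pvA_xloop, h, ih]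

lemma pvA_yloop_eq_any (grid : List String) (mx ph pw : Int) (l : List Int) :
    pvA_yloop grid mx ph pw l
      = l.any (fun y => pvA_xloop grid y ph pw (PySem.List.pyRange 0 (mx - pw + 1) 1)) := by
  induction l with
  | nil => rfl
  | cons a t ih =>
      by_cases h : pvA_xloop grid a ph pw (PySem.List.pyRange 0 (mx - pw + 1) 1) = true <;>
        simp [pvA_yloop, h, ih]

lemma pvA_pat_cells (grid : List String) (y x : Int) :
    pvA_pat grid y x 7 (PySem.List.pyRange 0 4 1)
      = pvCells.all (fun c => pvA_cell grid (y + c.1) (x + c.2) == '#') := by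
  have h4 : PySem.List.pyRange 0 4 1 = [0, 1, 2, 3] := by decide
  have h7 : PySem.List.pyRange 0 7 1 = [0, 1, 2, 3, 4, 5, 6] := by decide
  have p00 : (pvA_cell pvA_treePattern 0 0 == '#') = false := by decide
  have p01 : (pvA_cell pvA_treePattern 0 1 == '#') = false := by decide
  have p02 : (pvA_cell pvA_treePattern 0 2 == '#') = false := by decide
  have p03 : (pvA_cell pvA_treePattern 0 3 == '#') = true := by decide
  have p04 : (pvA_cell pvA_treePattern 0 4 == '#') = false := by decide
  have p05 : (pvA_cell pvA_treePattern 0 5 == '#') = false := by decide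
  have p06 : (pvA_cell pvA_treePattern 0 6 == '#') = false := by decide
  have p10 : (pvA_cell pvA_treePattern 1 0 == '#') = false := by decide
  have p11 : (pvA_cell pvA_treePattern 1 1 == '#') = false := by decide
  have p12 : (pvA_cell pvA_treePattern 1 2 == '#') = true := by decide
  have p13 : (pvA_cell pvA_treePattern 1 3 == '#') = true := by decide
  have p14 : (pvA_cell pvA_treePattern 1 4 == '#') = true := by decide
  have p15 : (pvA_cell pvA_treePattern 1 5 == '#') = false := by decide
  have p16 : (pvA_cell pvA_treePattern 1 6 == '#') = false := by decide
  have p20 : (pvA_cell pvA_treePattern 2 0 == '#') = false := by decide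
  have p21 : (pvA_cell pvA_treePattern 2 1 == '#') = true := by decide
  have p22 : (pvA_cell pvA_treePattern 2 2 == '#') = true := by decide
  have p23 : (pvA_cell pvA_treePattern 2 3 == '#') = true := by decide
  have p24 : (pvA_cell pvA_treePattern 2 4 == '#') = true := by decide
  have p25 : (pvA_cell pvA_treePattern 2 5 == '#') = true := by decide
  have p26 : (pvA_cell pvA_treePattern 2 6 == '#') = false := by decide
  have p30 : (pvA_cell pvA_treePattern 3 0 == '#') = true := by decide
  have p31 : (pvA_cell pvA_treePattern 3 1 == '#') = true := by decide
  have p32 : (pvA_cell pvA_treePattern 3 2 == '#') = true := by decide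
  have p33 : (pvA_cell pvA_treePattern 3 3 == '#') = true := by decide
  have p34 : (pvA_cell pvA_treePattern 3 4 == '#') = true := by decide
  have p35 : (pvA_cell pvA_treePattern 3 5 == '#') = true := by decide
  have p36 : (pvA_cell pvA_treePattern 3 6 == '#') = true := by decide
  rw [pvA_pat_eq_all, h4, h7]
  simp only [pvA_row_eq_all, List.all_cons, List.all_nil, pvA_mismatch, pvCells,
    p00, p01, p02, p03, p04, p05, p06, p10, p11, p12, p13, p14, p15, p16,
    p20, p21, p22, p23, p24, p25, p26, p30, p31, p32, p33, p34, p35, p36,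
    Bool.false_and, Bool.true_and, Bool.not_false, Bool.not_not, Bool.and_true,
    Bool.and_assoc, add_zero]


lemma pvA_cell_of_some {grid : List String} {r : String} {c : Char} {i j : Int}
    (hr : PySem.List.pyGet? grid i = some r) (hc : PySem.Str.pyGet? r j = some c) :
    pvA_cell grid i j = c := by
  have hc' : PySem.List.pyGet? r.toList j = some c := hc
  simp [pvA_cell, hr, hc']

lemma pvB_cell_of_mem (grid : List String) (p : Int × Int) (h : p ∈ pvB_list grid) :
    0 ≤ p.1 ∧ 0 ≤ p.2 ∧ pvA_cell grid p.1 p.2 = '#' := by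
  simp only [pvB_list, List.mem_flatMap, List.mem_filterMap] at h
  obtain ⟨yr, hyr, xc, hxc, hf⟩ := h
  rw [PySem.List.mem_enumerate_iff] at hyr
  obtain ⟨k, hk, rfl⟩ := hyr
  rw [PySem.List.mem_enumerate_iff] at hxc
  obtain ⟨m, hm, rfl⟩ := hxc
  simp only [zero_add] at hf ⊢
  by_cases hch : grid[k].toList[m] = '#'
  · rw [if_pos hch] at hf
    obtain rfl := (Option.some_inj.mp hf).symm
    refine ⟨by positivity, by positivity, ?_⟩
    have hr : PySem.List.pyGet? grid ((k : Nat) : Int) = some grid[k] := by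
      rw [PySem.List.pyGet?_natCast]; simp [hk]
    have hc : PySem.Str.pyGet? grid[k] ((m : Nat) : Int) = some grid[k].toList[m] := by
      rw [PySem.Str.pyGet?_natCast]; simp
    simp only [pvA_cell_of_some hr hc]
    exact hch
  · rw [if_neg hch] at hf
    exact absurd hf (by simp)

lemma pvB_mem_of_cell (grid : List String) (k m : Nat) (hk : k < grid.length)
    (hm : m < grid[k].toList.length) (hc : grid[k].toList[m] = '#') :
    ((k : Int), (m : Int)) ∈ pvB_list grid := by
  simp only [pvB_list, List.mem_flatMap, List.mem_filterMap]
  refine ⟨((k : Int), grid[k]), ?_, ((m : Int), grid[k].toList[m]), ?_, ?_⟩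
  · rw [PySem.List.mem_enumerate_iff]; exact ⟨k, hk, by simp⟩
  · rw [PySem.List.mem_enumerate_iff]; exact ⟨m, hm, by simp⟩
  · simp [hc]

lemma pvWindow_mem (grid : List String) (mx my : Int)
    (hlen : my ≤ (grid.length : Int))
    (hrows : ∀ s ∈ grid.take my.toNat, mx ≤ PySem.Str.len s)
    (i j : Int) (h0 : 0 ≤ i) (h1 : i < my) (h2 : 0 ≤ j) (h3 : j < mx) :
    pvA_cell grid i j = '#' ↔ (i, j) ∈ pvB_list grid := by
  have hk : i.toNat < grid.length := by omega
  have hrowmem : grid[i.toNat] ∈ grid.take my.toNat := by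
    have hkt : i.toNat < (grid.take my.toNat).length := by
      simp only [List.length_take]; omega
    have : (grid.take my.toNat)[i.toNat] = grid[i.toNat] := List.getElem_take
    exact this ▸ List.getElem_mem hkt
  have hlenrow : mx ≤ (grid[i.toNat].toList.length : Int) := by
    have := hrows _ hrowmem; rwa [PySem.Str.len_eq] at this
  have hm : j.toNat < grid[i.toNat].toList.length := by omega
  have hr : PySem.List.pyGet? grid i = some grid[i.toNat] := by
    rw [PySem.List.pyGet?_of_nonneg grid h0]; simp [hk]
  have hcget : PySem.Str.pyGet? grid[i.toNat] j = some grid[i.toNat].toList[j.toNat] := by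
    have : PySem.Str.pyGet? grid[i.toNat] j = PySem.List.pyGet? grid[i.toNat].toList j := by
      simp [pysem]
    rw [this, PySem.List.pyGet?_of_nonneg _ h2]; simp
  constructor
  · intro hc
    rw [pvA_cell_of_some hr hcget] at hc
    have := pvB_mem_of_cell grid i.toNat j.toNat hk hm hc
    rwa [Int.toNat_of_nonneg h0, Int.toNat_of_nonneg h2] at this
  · intro hmem
    exact (pvB_cell_of_mem grid _ hmem).2.2

lemma pvA_iff (grid : List String) (mx my : Int) :
    check_for_christmas_tree grid mx my = true ↔
      ∃ y, (0 ≤ y ∧ y < my - 4 + 1) ∧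
        ∃ x, (0 ≤ x ∧ x < mx - 7 + 1) ∧
          ∀ c ∈ pvCells, pvA_cell grid (y + c.1) (x + c.2) = '#' := by
  have hA : check_for_christmas_tree grid mx my
      = pvA_yloop grid mx 4 7 (PySem.List.pyRange 0 (my - 4 + 1) 1) := rfl
  rw [hA, pvA_yloop_eq_any]
  simp only [pvA_xloop_eq_any, pvA_pat_cells, List.any_eq_true, PySem.List.mem_pyRange_one,
    List.all_eq_true, beq_iff_eq]

lemma pvB_iff (grid : List String) (mx my : Int) :
    check_for_christmas_tree_alt grid mx my = true ↔
      ∃ p ∈ pvB_list grid, (0 ≤ p.1 ∧ p.1 ≤ my - 4 ∧ 3 ≤ p.2 ∧ p.2 ≤ mx - 4) ∧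
        ∀ o ∈ pvB_offsets, (p.1 + o.1, p.2 + o.2) ∈ pvB_list grid := by
  simp only [check_for_christmas_tree_alt, List.any_eq_true, Bool.and_eq_true,
    decide_eq_true_eq, List.all_eq_true, PySem.Set.contains_iff, PySem.Set.mem_ofList]

-- ===== VERDICT (by name: the statement is the Claim_ definition above) =====
theorem check_for_christmas_tree_spec : Claim_equal_check_for_christmas_tree := by
  intro grid mx my hdom hpre
  unfold Spec_check_for_christmas_tree
  rw [Bool.eq_iff_iff, pvA_iff, pvB_iff]
  constructor
  · rintro ⟨y, ⟨hy0, hy1⟩, x, ⟨hx0, hx1⟩, hcells⟩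
    obtain ⟨hlen, hrows⟩ := hpre (by omega)
    have hob : ∀ o ∈ pvB_offsets, 0 ≤ o.1 ∧ o.1 ≤ 3 ∧ -3 ≤ o.2 ∧ o.2 ≤ 3 := by decide
    have hoc : ∀ o ∈ pvB_offsets, (o.1, o.2 + 3) ∈ pvCells := by decide
    refine ⟨(y, x + 3), ?_, ⟨by omega, by omega, by omega, by omega⟩, ?_⟩
    · have hc := hcells (0, 3) (by decide)
      simp only [add_zero] at hc
      exact (pvWindow_mem grid mx my hlen hrows y (x + 3) (by omega) (by omega) (by omega)
        (by omega)).1 hc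
    · intro o ho
      obtain ⟨ho1, ho2, ho3, ho4⟩ := hob o ho
      have hc := hcells _ (hoc o ho)
      have harith : x + (o.2 + 3) = x + 3 + o.2 := by ring
      rw [harith] at hc
      exact (pvWindow_mem grid mx my hlen hrows (y + o.1) (x + 3 + o.2) (by omega) (by omega)
        (by omega) (by omega)).1 hc
  · rintro ⟨p, hp, ⟨hb1, hb2, hb3, hb4⟩, hoff⟩
    have hco : ∀ c ∈ pvCells, (c.1, c.2 - 3) ∈ pvB_offsets := by decide
    refine ⟨p.1, ⟨hb1, by omega⟩, p.2 - 3, ⟨by omega, by omega⟩, ?_⟩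
    intro c hc
    have hcell := (pvB_cell_of_mem grid _ (hoff _ (hco c hc))).2.2
    have harith : p.2 + (c.2 - 3) = p.2 - 3 + c.2 := by ring
    rwa [harith] at hcell
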